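-- pv_equiv track=rewrite | github.com/stella-etoile/wordle-solver | starter.py | pattern_id_for
-- ===== SOURCE A (Python) =====
-- def pattern_id_for(secret, guess):
--     """
--     Returns pattern encoded as base-3 integer in [0, 3^n).
--     For n=5, range is 0..242. This is much faster to count than strings.
--     """
--     n = len(secret)
--     res = [0] * n
--     secret_chars = list(secret)
--     guess_chars = list(guess)
--
--     # greens
--     for i in range(n):
--         if guess_chars[i] == secret_chars[i]:
--             res[i] = 2
--             secret_chars[i] = None
--             guess_chars[i] = None
--
--     # yellows
--     for i in range(n):
--         if guess_chars[i] is not None: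
--             ch = guess_chars[i]
--             # linear search over 5 letters is fine
--             if ch in secret_chars:
--                 res[i] = 1
--                 secret_chars[secret_chars.index(ch)] = None
--
--     # base-3 encode (left-to-right)
--     x = 0
--     for d in res:
--         x = x * 3 + d
--     return x
-- ===== SOURCE B (Python) =====
-- def pattern_id_for(secret, guess):
--     """
--     Returns pattern encoded as base-3 integer in [0, 3^n).
--     Stateless positional rule: a non-green slot i is yellow iff the
--     occurrence rank of guess[i] among non-green guess slots up to i does
--     not exceed that letter's supply among non-green secret slots; each
--     digit is weighted by its power of 3 and the weighted digits summed.
--     """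
--     n = len(secret)
--     green = [secret[i] == guess[i] for i in range(n)]
--
--     def digit(i):
--         if green[i]:
--             return 2
--         c = guess[i]
--         rank = sum(1 for j in range(i + 1) if not green[j] and guess[j] == c)
--         supply = sum(1 for j in range(n) if not green[j] and secret[j] == c)
--         return 1 if rank <= supply else 0
--
--     return sum(digit(i) * 3 ** (n - 1 - i) for i in range(n))
-- ===== Notes on version B (the rewrite author's own statement) =====
-- stated objective: alternative
-- what changed: A consumes a mutable multiset in two staged mutation passes (greens blank slots, yellows scan-and-clear with `in`/.index) and then Horner-encodes a res array; B is stateless: each slot's digit is decided by a closed positional rule (yellow iff the occurrence rank of guess[i] among non-green guess slots up to i is at most that letter's supply among non-green secret slots) and the digits are summed with explicit powers of 3.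
import Mathlib
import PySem

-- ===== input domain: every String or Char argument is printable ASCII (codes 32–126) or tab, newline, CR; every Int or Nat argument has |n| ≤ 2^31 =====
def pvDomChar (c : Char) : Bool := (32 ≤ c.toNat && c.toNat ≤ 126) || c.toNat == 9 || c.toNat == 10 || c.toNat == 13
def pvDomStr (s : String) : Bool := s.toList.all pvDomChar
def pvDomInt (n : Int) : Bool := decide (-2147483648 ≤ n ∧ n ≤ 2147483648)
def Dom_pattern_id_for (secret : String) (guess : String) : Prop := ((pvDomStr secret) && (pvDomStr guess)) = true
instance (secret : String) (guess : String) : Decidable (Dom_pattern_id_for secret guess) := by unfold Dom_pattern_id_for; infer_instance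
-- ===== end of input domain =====

-- B replaces A's two staged mutation passes over a consumed multiset by a stateless
-- per-position rule (yellow iff occurrence rank ≤ letter supply among non-green slots)
-- with explicit power-of-3 weights; an alternative of similar cost, not claimed faster.

-- ===== PORT A =====
-- greens loop body: res[i]=2 and both slots set to None when guess_chars[i] == secret_chars[i]
def pvAGreenStep (st : List (Option Char) × List (Option Char) × List Int) (i : Int) :
    List (Option Char) × List (Option Char) × List Int :=
  if PySem.List.pyGetD st.2.1 i none == PySem.List.pyGetD st.1 i none then
    (PySem.List.pySetD st.1 i none, PySem.List.pySetD st.2.1 i none, PySem.List.pySetD st.2.2 i 2)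
  else st

-- yellows loop body: if guess_chars[i] is not None and ch in secret_chars, res[i]=1 and the
-- first matching secret slot is cleared (secret_chars[secret_chars.index(ch)] = None)
def pvAYellowStep (gc : List (Option Char)) (st : List (Option Char) × List Int) (i : Int) :
    List (Option Char) × List Int :=
  match PySem.List.pyGetD gc i none with
  | none => st
  | some ch =>
    if some ch ∈ st.1 then
      match PySem.List.index? st.1 (some ch) with
      | some j => (PySem.List.pySetD st.1 (j : Int) none, PySem.List.pySetD st.2 i 1)
      | none => st
    else st

def pattern_id_for (secret : String) (guess : String) : Int :=
  let n := secret.toList.length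
  let res : List Int := List.replicate n 0
  let secret_chars : List (Option Char) := secret.toList.map some
  let guess_chars : List (Option Char) := guess.toList.map some
  let st1 := (PySem.List.pyRange 0 (n : Int) 1).foldl pvAGreenStep (secret_chars, guess_chars, res)
  let st2 := (PySem.List.pyRange 0 (n : Int) 1).foldl (pvAYellowStep st1.2.1) (st1.1, st1.2.2)
  st2.2.foldl (fun x d => x * 3 + d) 0

-- ===== PORT B =====
-- green = [secret[i] == guess[i] for i in range(n)]
def pvBGreen (s g : List Char) (n : Nat) : List Bool :=
  (PySem.List.pyRange 0 (n : Int) 1).map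
    (fun i => PySem.List.pyGetD s i ' ' == PySem.List.pyGetD g i ' ')

-- sum(1 for j in range(m) if p(j))
def pvBCountIf (p : Int → Bool) (m : Int) : Int :=
  (PySem.List.pyRange 0 m 1).foldl (fun a j => if p j then a + 1 else a) 0

-- digit(i): 2 on green; else 1 iff rank ≤ supply, else 0
def pvBDigit (s g : List Char) (green : List Bool) (n : Nat) (i : Int) : Int :=
  if PySem.List.pyGetD green i false then 2
  else
    let c := PySem.List.pyGetD g i ' '
    let rank := pvBCountIf
      (fun j => !(PySem.List.pyGetD green j false) && (PySem.List.pyGetD g j ' ' == c)) (i + 1)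
    let supply := pvBCountIf
      (fun j => !(PySem.List.pyGetD green j false) && (PySem.List.pyGetD s j ' ' == c)) (n : Int)
    if rank ≤ supply then 1 else 0

def pattern_id_for_alt (secret : String) (guess : String) : Int :=
  let n := secret.toList.length
  let s := secret.toList
  let g := guess.toList
  let green := pvBGreen s g n
  (PySem.List.pyRange 0 (n : Int) 1).foldl
    (fun acc i => acc + pvBDigit s g green n i * 3 ^ (n - 1 - i.toNat)) 0

-- ===== PRECONDITION & SPEC =====
-- A indexes guess_chars[i] for every i < len(secret): when the guess is shorter than the
-- secret Python raises IndexError, so exactly those inputs are excluded.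
def Pre_pattern_id_for (secret : String) (guess : String) : Prop :=
  secret.toList.length ≤ guess.toList.length
instance (secret : String) (guess : String) : Decidable (Pre_pattern_id_for secret guess) := by
  unfold Pre_pattern_id_for; infer_instance

def pvWitness_pattern_id_for : String × String := ("raise", "alert")

def Spec_pattern_id_for (secret : String) (guess : String) (out : Int) : Prop :=
  out = pattern_id_for_alt secret guess
instance (secret : String) (guess : String) (out : Int) :
    Decidable (Spec_pattern_id_for secret guess out) := by
  unfold Spec_pattern_id_for; infer_instance

-- ===== CLAIM (what is proved, stated in full; the proofs are below) =====
def Claim_equal_pattern_id_for : Prop :=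
  ∀ (secret : String) (guess : String), Dom_pattern_id_for secret guess →
    Pre_pattern_id_for secret guess →
    Spec_pattern_id_for secret guess (pattern_id_for secret guess)

-- ===== LEMMAS AND PROOFS =====

-- the secret slots left after the greens pass
def pvZ1 (s g : List Char) : List (Option Char) :=
  List.zipWith (fun a b => if b = a then none else some a) s g
-- the guess slots left after the greens pass (first len secret entries)
def pvZ2 (s g : List Char) : List (Option Char) :=
  List.zipWith (fun a b => if b = a then none else some b) s g
-- res after the greens pass
def pvZ3 (s g : List Char) : List Int :=
  List.zipWith (fun a b => if b = a then (2 : Int) else 0) s g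

def pvDec (cnt : Char → Nat) (ch : Char) : Char → Nat :=
  fun c => if c = ch then cnt c - 1 else cnt c

-- reference run of the yellows pass: digits produced and remaining letter counts
def pvRun : List (Option Char) → (Char → Nat) → List Int × (Char → Nat)
  | [], cnt => ([], cnt)
  | none :: gs, cnt => let r := pvRun gs cnt; (2 :: r.1, r.2)
  | some ch :: gs, cnt =>
    if 0 < cnt ch then let r := pvRun gs (pvDec cnt ch); (1 :: r.1, r.2)
    else let r := pvRun gs cnt; (0 :: r.1, r.2)

def pvCnt0 (s g : List Char) : Char → Nat := fun c => (pvZ1 s g).count (some c)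

-- forward invariant induction over a range-indexed foldl
lemma pvFoldInv {σ : Type} (f : σ → Nat → σ) (P : Nat → σ → Prop) (n : Nat)
    (step : ∀ k st, k < n → P k st → P (k + 1) (f st k)) (st0 : σ) (h0 : P 0 st0) :
    P n ((List.range n).foldl f st0) := by
  suffices h : ∀ m k st, k + m = n → P k st → P n ((List.range' k m).foldl f st) by
    simpa [List.range_eq_range'] using h n 0 st0 (by omega) h0
  intro m
  induction m with
  | zero =>
    intro k st hk hP
    have : k = n := by omega
    subst this; simpa using hP
  | succ m ih =>
    intro k st hk hP
    rw [List.range'_succ]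
    exact ih (k + 1) (f st k) (by omega) (step k st (by omega) hP)

lemma pvRangeFold {σ : Type} (n : Nat) (f : σ → Int → σ) (init : σ) :
    (PySem.List.pyRange 0 (n : Int) 1).foldl f init
      = (List.range n).foldl (fun st (k : Nat) => f st (k : Int)) init := by
  have h : PySem.List.pyRange 0 (n : Int) 1 = (List.range n).map (fun (k : Nat) => (k : Int)) := by
    rw [PySem.List.pyRange_one]
    simp only [sub_zero, Int.toNat_natCast, zero_add]
  rw [h, List.foldl_map]

lemma pvGetDAppend {α : Type} (l1 l2 : List α) (d : α) (k : Nat) (hk : l1.length = k)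
    (h2 : 0 < l2.length) : (l1 ++ l2).getD k d = l2[0] := by
  subst hk
  simp [List.getD_eq_getElem?_getD, h2]

lemma pvGetDAppendLeft {α : Type} (l1 l2 : List α) (d : α) (k : Nat) (hk : k < l1.length) :
    (l1 ++ l2).getD k d = l1[k] := by
  simp [List.getD_eq_getElem?_getD, List.getElem?_append_left hk, hk]

lemma pvSetAppend {α : Type} (l1 l2 : List α) (k : Nat) (hk : l1.length = k) (v : α) :
    (l1 ++ l2).set k v = l1 ++ l2.set 0 v := by
  subst hk
  rw [List.set_append]; simp

lemma pvZWTakeSucc {β : Type} (F : Char → Char → β) (s g : List Char) (k : Nat)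
    (hk : k < s.length) (hkg : k < g.length) :
    List.zipWith F (s.take (k + 1)) (g.take (k + 1))
      = List.zipWith F (s.take k) (g.take k) ++ [F s[k] g[k]] := by
  rw [List.take_succ_eq_append_getElem hk, List.take_succ_eq_append_getElem hkg,
      List.zipWith_append (h := by simp [List.length_take]; omega)]
  rfl

lemma pvZWTakeLen {β : Type} (F : Char → Char → β) (s g : List Char) :
    List.zipWith F (s.take s.length) (g.take s.length) = List.zipWith F s g := by
  rw [← List.take_zipWith]
  apply List.take_of_length_le
  simp

lemma pvZ1TakeLength (s g : List Char) (k : Nat) (hk : k ≤ s.length) (hkg : k ≤ g.length) :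
    (pvZ1 (s.take k) (g.take k)).length = k := by
  simp [pvZ1, List.length_take]; omega

lemma pvZ2TakeLength (s g : List Char) (k : Nat) (hk : k ≤ s.length) (hkg : k ≤ g.length) :
    (pvZ2 (s.take k) (g.take k)).length = k := by
  simp [pvZ2, List.length_take]; omega

lemma pvZ3TakeLength (s g : List Char) (k : Nat) (hk : k ≤ s.length) (hkg : k ≤ g.length) :
    (pvZ3 (s.take k) (g.take k)).length = k := by
  simp [pvZ3, List.length_take]; omega

lemma pvDropMapCons (l : List Char) (k : Nat) (hk : k < l.length) :
    List.drop k (l.map some) = some l[k] :: List.drop (k + 1) (l.map some) := by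
  rw [List.drop_eq_getElem_cons (by simpa using hk)]
  simp

lemma pvZ1TakeSucc (s g : List Char) (k : Nat) (hk : k < s.length) (hkg : k < g.length) :
    pvZ1 (s.take (k + 1)) (g.take (k + 1))
      = pvZ1 (s.take k) (g.take k) ++ [if g[k] = s[k] then none else some s[k]] := by
  simp only [pvZ1]
  rw [pvZWTakeSucc _ s g k hk hkg]

lemma pvZ2TakeSucc (s g : List Char) (k : Nat) (hk : k < s.length) (hkg : k < g.length) :
    pvZ2 (s.take (k + 1)) (g.take (k + 1))
      = pvZ2 (s.take k) (g.take k) ++ [if g[k] = s[k] then none else some g[k]] := by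
  simp only [pvZ2]
  rw [pvZWTakeSucc _ s g k hk hkg]

lemma pvZ3TakeSucc (s g : List Char) (k : Nat) (hk : k < s.length) (hkg : k < g.length) :
    pvZ3 (s.take (k + 1)) (g.take (k + 1))
      = pvZ3 (s.take k) (g.take k) ++ [if g[k] = s[k] then (2 : Int) else 0] := by
  simp only [pvZ3]
  rw [pvZWTakeSucc _ s g k hk hkg]

-- green pass characterization
lemma pvGreenLoop (s g : List Char) (hlen : s.length ≤ g.length) :
    (List.range s.length).foldl (fun st (k : Nat) => pvAGreenStep st (k : Int))
      (s.map some, g.map some, List.replicate s.length 0)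
    = (pvZ1 s g, pvZ2 s g ++ (g.drop s.length).map some, pvZ3 s g) := by
  have h := pvFoldInv (fun st (k : Nat) => pvAGreenStep st (k : Int))
    (fun k st => k ≤ s.length ∧
      st = (pvZ1 (s.take k) (g.take k) ++ (s.drop k).map some,
            pvZ2 (s.take k) (g.take k) ++ (g.drop k).map some,
            pvZ3 (s.take k) (g.take k) ++ List.replicate (s.length - k) 0))
    s.length ?_ (s.map some, g.map some, List.replicate s.length 0) ?_
  · obtain ⟨-, h⟩ := h
    rw [h]
    simp only [pvZ1, pvZ2, pvZ3, pvZWTakeLen]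
    simp
  · intro k st hk hP
    obtain ⟨-, hst⟩ := hP
    have hkg : k < g.length := by omega
    have hds : s.drop k = s[k] :: s.drop (k + 1) := List.drop_eq_getElem_cons hk
    have hdg : g.drop k = g[k] :: g.drop (k + 1) := List.drop_eq_getElem_cons hkg
    have hl1 : (pvZ1 (s.take k) (g.take k)).length = k := pvZ1TakeLength s g k (by omega) (by omega)
    have hl2 : (pvZ2 (s.take k) (g.take k)).length = k := pvZ2TakeLength s g k (by omega) (by omega)
    have hl3 : (pvZ3 (s.take k) (g.take k)).length = k := pvZ3TakeLength s g k (by omega) (by omega)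
    have hg1 : PySem.List.pyGetD (pvZ1 (s.take k) (g.take k) ++ (s.drop k).map some) (k : Int) none
        = some s[k] := by
      rw [PySem.List.pyGetD_natCast,
        pvGetDAppend _ ((s.drop k).map some) _ _ hl1 (by simp only [List.length_map, List.length_drop]; omega)]
      simp only [hds]
      simp
    have hg2 : PySem.List.pyGetD (pvZ2 (s.take k) (g.take k) ++ (g.drop k).map some) (k : Int) none
        = some g[k] := by
      rw [PySem.List.pyGetD_natCast,
        pvGetDAppend _ ((g.drop k).map some) _ _ hl2 (by simp only [List.length_map, List.length_drop]; omega)]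
      simp only [hdg]
      simp
    refine ⟨by omega, ?_⟩
    rw [hst]
    by_cases hgs : g[k] = s[k]
    · -- green position
      simp only [pvAGreenStep, hg1, hg2, hgs, beq_self_eq_true, if_true]
      rw [PySem.List.pySetD_natCast, PySem.List.pySetD_natCast, PySem.List.pySetD_natCast]
      refine Prod.ext ?_ (Prod.ext ?_ ?_) <;> simp only
      · rw [pvSetAppend _ _ _ hl1, pvZ1TakeSucc s g k hk hkg]
        simp [hgs, pvDropMapCons s k hk]
      · rw [pvSetAppend _ _ _ hl2, pvZ2TakeSucc s g k hk hkg]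
        simp [hgs, pvDropMapCons g k hkg]
      · rw [pvSetAppend _ _ _ hl3, pvZ3TakeSucc s g k hk hkg]
        have hrep : List.replicate (s.length - k) (0 : Int) = 0 :: List.replicate (s.length - (k + 1)) 0 := by
          have : s.length - k = (s.length - (k + 1)) + 1 := by omega
          rw [this, List.replicate_succ]
        rw [hrep]
        simp [hgs]
    · -- non-green position
      have hne : (some g[k] == some s[k]) = false := by simp [hgs]
      simp only [pvAGreenStep, hg1, hg2, hne, Bool.false_eq_true, if_false]
      refine Prod.ext ?_ (Prod.ext ?_ ?_) <;> simp only
      · rw [pvZ1TakeSucc s g k hk hkg]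
        simp [hgs, pvDropMapCons s k hk]
      · rw [pvZ2TakeSucc s g k hk hkg]
        simp [hgs, pvDropMapCons g k hkg]
      · rw [pvZ3TakeSucc s g k hk hkg]
        have hrep : List.replicate (s.length - k) (0 : Int) = 0 :: List.replicate (s.length - (k + 1)) 0 := by
          have : s.length - k = (s.length - (k + 1)) + 1 := by omega
          rw [this, List.replicate_succ]
        rw [hrep]
        simp [hgs]
  · simp [pvZ1, pvZ2, pvZ3]

lemma pvRunLength (l : List (Option Char)) (cnt : Char → Nat) : (pvRun l cnt).1.length = l.length := by
  induction l generalizing cnt with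
  | nil => rfl
  | cons o l ih =>
    cases o with
    | none => simp [pvRun, ih]
    | some ch =>
      by_cases h : 0 < cnt ch <;> simp [pvRun, h, ih]

lemma pvRunAppend (l1 l2 : List (Option Char)) (cnt : Char → Nat) :
    pvRun (l1 ++ l2) cnt
      = ((pvRun l1 cnt).1 ++ (pvRun l2 (pvRun l1 cnt).2).1, (pvRun l2 (pvRun l1 cnt).2).2) := by
  induction l1 generalizing cnt with
  | nil => simp [pvRun]
  | cons o l1 ih =>
    cases o with
    | none => simp [pvRun, ih]
    | some ch =>
      by_cases h : 0 < cnt ch <;> simp [pvRun, h, ih]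

-- replacing the first occurrence of (some ch) by none decrements exactly that letter's count
lemma pvCountSet (sc : List (Option Char)) (ch : Char) (j : Nat)
    (hj : PySem.List.index? sc (some ch) = some j) (c : Char) :
    (sc.set j none).count (some c)
      = if c = ch then sc.count (some ch) - 1 else sc.count (some c) := by
  obtain ⟨pre, suf, hsc, hlenp, -⟩ := (PySem.List.index?_eq_some_iff sc (some ch) j).mp hj
  subst hsc
  rw [pvSetAppend _ _ _ hlenp]
  by_cases hc : c = ch
  · subst hc
    simp only [List.count_append, List.count_cons, if_pos]
    simp
  · have hc' : ¬ (some ch = some c) := by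
      intro h
      exact hc (Option.some.inj h).symm
    simp [hc, hc', List.count_append]

lemma pvEncAppend (ds : List Int) (d : Int) :
    (ds ++ [d]).foldl (fun x d => x * 3 + d) 0
      = (ds.foldl (fun x d => x * 3 + d) 0) * 3 + d := by
  rw [List.foldl_append]
  rfl

-- yellow pass characterization: final res is the digits of the reference run
lemma pvYellowLoop (s g : List Char) (hlen : s.length ≤ g.length) :
    ((List.range s.length).foldl
        (fun st (k : Nat) => pvAYellowStep (pvZ2 s g ++ (g.drop s.length).map some) st (k : Int))
        (pvZ1 s g, pvZ3 s g)).2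
      = (pvRun (pvZ2 s g) (pvCnt0 s g)).1 := by
  have hlZ2 : (pvZ2 s g).length = s.length := by simp [pvZ2]; omega
  have hlZ3 : (pvZ3 s g).length = s.length := by simp [pvZ3]; omega
  have h := pvFoldInv
    (fun st (k : Nat) => pvAYellowStep (pvZ2 s g ++ (g.drop s.length).map some) st (k : Int))
    (fun k st =>
      (∀ c : Char, st.1.count (some c) = (pvRun ((pvZ2 s g).take k) (pvCnt0 s g)).2 c) ∧
      st.2 = (pvRun ((pvZ2 s g).take k) (pvCnt0 s g)).1 ++ (pvZ3 s g).drop k)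
    s.length ?_ (pvZ1 s g, pvZ3 s g) ?_
  · obtain ⟨-, h2⟩ := h
    rw [h2, List.take_of_length_le (by omega), List.drop_eq_nil_of_le (by omega), List.append_nil]
  · intro k st hk hP
    obtain ⟨hcnt, hres⟩ := hP
    have hkg : k < g.length := by omega
    have hkZ2 : k < (pvZ2 s g).length := by omega
    have hgc : PySem.List.pyGetD (pvZ2 s g ++ (g.drop s.length).map some) (k : Int) none
        = (pvZ2 s g)[k] := by
      rw [PySem.List.pyGetD_natCast]
      exact pvGetDAppendLeft _ _ _ k hkZ2
    have hZ2k : (pvZ2 s g)[k] = if g[k] = s[k] then none else some g[k] := by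
      simp [pvZ2, List.getElem_zipWith]
    have hZ3d : (pvZ3 s g).drop k = (if g[k] = s[k] then (2:Int) else 0) :: (pvZ3 s g).drop (k+1) := by
      rw [List.drop_eq_getElem_cons (by omega)]
      simp [pvZ3, List.getElem_zipWith]
    have htk : (pvZ2 s g).take (k+1) = (pvZ2 s g).take k ++ [(pvZ2 s g)[k]] :=
      List.take_succ_eq_append_getElem hkZ2
    have hlrun : (pvRun ((pvZ2 s g).take k) (pvCnt0 s g)).1.length = k := by
      rw [pvRunLength]
      simp [List.length_take]; omega
    dsimp only
    by_cases hgs : g[k] = s[k]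
    · -- green position: the yellow pass skips it, digit stays 2
      have hstep : pvAYellowStep (pvZ2 s g ++ (g.drop s.length).map some) st (k : Int) = st := by
        simp only [pvAYellowStep, hgc, hZ2k, if_pos hgs]
      rw [hstep, htk, pvRunAppend, hZ2k, if_pos hgs]
      constructor
      · intro c
        simpa [pvRun] using hcnt c
      · rw [hres, hZ3d, if_pos hgs]
        simp [pvRun]
    · by_cases hpos : 0 < (pvRun ((pvZ2 s g).take k) (pvCnt0 s g)).2 g[k]
      · -- yellow: a copy of the letter is still available
        have hmem : some g[k] ∈ st.1 := by
          apply List.count_pos_iff.mp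
          rw [hcnt g[k]]
          exact hpos
        have hsome : (PySem.List.index? st.1 (some g[k])).isSome := by
          rw [PySem.List.index?_isSome_iff]
          exact hmem
        obtain ⟨j, hj⟩ := Option.isSome_iff_exists.mp hsome
        have hstep : pvAYellowStep (pvZ2 s g ++ (g.drop s.length).map some) st (k : Int)
            = (st.1.set j none, st.2.set k 1) := by
          simp only [pvAYellowStep, hgc, hZ2k, if_neg hgs, if_pos hmem, hj,
            PySem.List.pySetD_natCast]
        rw [hstep, htk, pvRunAppend, hZ2k, if_neg hgs]
        constructor
        · intro c
          rw [pvCountSet st.1 g[k] j hj c]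
          simp only [pvRun, if_pos hpos]
          by_cases hc : c = g[k]
          · rw [if_pos hc, hc, hcnt g[k]]
            simp [pvDec]
          · rw [if_neg hc, hcnt c]
            simp [pvDec, hc]
        · rw [hres, hZ3d, if_neg hgs, pvSetAppend _ _ _ hlrun]
          simp only [pvRun, if_pos hpos]
          simp
      · -- gray: no copy left
        have hmem : ¬ some g[k] ∈ st.1 := by
          intro hm
          exact hpos (by rw [← hcnt g[k]]; exact List.count_pos_iff.mpr hm)
        have hstep : pvAYellowStep (pvZ2 s g ++ (g.drop s.length).map some) st (k : Int) = st := by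
          simp only [pvAYellowStep, hgc, hZ2k, if_neg hgs, if_neg hmem]
        rw [hstep, htk, pvRunAppend, hZ2k, if_neg hgs]
        constructor
        · intro c
          simp only [pvRun, if_neg hpos]
          exact hcnt c
        · rw [hres, hZ3d, if_neg hgs]
          simp only [pvRun, if_neg hpos]
          simp
  · constructor
    · intro c
      simp [pvRun, pvCnt0]
    · simp [pvRun]

-- B-side lemmas ------------------------------------------------------------

-- green list element
lemma pvGreenGet (s g : List Char) (n k : Nat) (hk : k < n) :
    PySem.List.pyGetD (pvBGreen s g n) (k : Int) false
      = (s.getD k ' ' == g.getD k ' ') := by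
  rw [PySem.List.pyGetD_natCast]
  unfold pvBGreen
  rw [PySem.List.pyRange_one]
  simp only [sub_zero, Int.toNat_natCast, zero_add, List.map_map]
  rw [List.getD_eq_getElem?_getD, List.getElem?_map, List.getElem?_range hk]
  simp [PySem.List.pyGetD_natCast]

-- the counting fold counts matching non-green positions = count in pvZ2/pvZ1 prefix
lemma pvRankCount (s g : List Char) (c : Char) (m : Nat)
    (hm : m ≤ s.length) (hlen : s.length ≤ g.length) :
    pvBCountIf
      (fun j => !(PySem.List.pyGetD (pvBGreen s g s.length) j false)
        && (PySem.List.pyGetD g j ' ' == c)) (m : Int)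
      = (((pvZ2 s g).take m).count (some c) : Int) := by
  unfold pvBCountIf
  rw [pvRangeFold]
  induction m with
  | zero => simp
  | succ m ih =>
    have hm' : m ≤ s.length := by omega
    have hk : m < s.length := by omega
    have hkg : m < g.length := by omega
    have hkZ2 : m < (pvZ2 s g).length := by simp [pvZ2]; omega
    rw [List.range_succ, List.foldl_append, ih hm']
    have hgr := pvGreenGet s g s.length m hk
    have hsg : s.getD m ' ' = s[m] := List.getD_eq_getElem s ' ' hk
    have hgg : g.getD m ' ' = g[m] := List.getD_eq_getElem g ' ' hkg
    have hgetg : PySem.List.pyGetD g ((m : Nat) : Int) ' ' = g[m] := by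
      rw [PySem.List.pyGetD_natCast, hgg]
    have htk : (pvZ2 s g).take (m + 1) = (pvZ2 s g).take m ++ [(pvZ2 s g)[m]] :=
      List.take_succ_eq_append_getElem hkZ2
    have hZ2k : (pvZ2 s g)[m] = if g[m] = s[m] then none else some g[m] := by
      simp [pvZ2, List.getElem_zipWith]
    rw [htk, hZ2k]
    simp only [List.foldl_cons, List.foldl_nil]
    simp only [hgr, hgetg, hsg, hgg]
    by_cases hgs : g[m] = s[m]
    · simp [hgs, List.count_append]
    · have hb : (s[m] == g[m]) = false := by
        simp only [beq_eq_false_iff_ne, ne_eq]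
        exact fun h => hgs h.symm
      simp only [hb]
      by_cases hc : g[m] = c
      · have hcs : ¬ c = s[m] := hc ▸ hgs
        simp [hc, hcs, List.count_append]
      · have hc' : ¬ (some g[m] = some c) := by simp [hc]
        simp [hgs, hc, hc', List.count_append]

lemma pvSupplyAux (s g : List Char) (c : Char) (m : Nat)
    (hm : m ≤ s.length) (hlen : s.length ≤ g.length) :
    pvBCountIf
      (fun j => !(PySem.List.pyGetD (pvBGreen s g s.length) j false)
        && (PySem.List.pyGetD s j ' ' == c)) (m : Int)
      = (((pvZ1 s g).take m).count (some c) : Int) := by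
  unfold pvBCountIf
  rw [pvRangeFold]
  induction m with
  | zero => simp
  | succ m ih =>
    have hm' : m ≤ s.length := by omega
    have hk : m < s.length := by omega
    have hkg : m < g.length := by omega
    have hkZ1 : m < (pvZ1 s g).length := by simp [pvZ1]; omega
    rw [List.range_succ, List.foldl_append, ih hm']
    have hgr := pvGreenGet s g s.length m hk
    have hsg : s.getD m ' ' = s[m] := List.getD_eq_getElem s ' ' hk
    have hgg : g.getD m ' ' = g[m] := List.getD_eq_getElem g ' ' hkg
    have hgets : PySem.List.pyGetD s ((m : Nat) : Int) ' ' = s[m] := by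
      rw [PySem.List.pyGetD_natCast, hsg]
    have htk : (pvZ1 s g).take (m + 1) = (pvZ1 s g).take m ++ [(pvZ1 s g)[m]] :=
      List.take_succ_eq_append_getElem hkZ1
    have hZ1k : (pvZ1 s g)[m] = if g[m] = s[m] then none else some s[m] := by
      simp [pvZ1, List.getElem_zipWith]
    rw [htk, hZ1k]
    simp only [List.foldl_cons, List.foldl_nil]
    simp only [hgr, hgets, hsg, hgg]
    by_cases hgs : g[m] = s[m]
    · simp [hgs, List.count_append]
    · have hb : (s[m] == g[m]) = false := by
        simp only [beq_eq_false_iff_ne, ne_eq]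
        exact fun h => hgs h.symm
      simp only [hb]
      by_cases hc : s[m] = c
      · have hgc : ¬ g[m] = c := hc ▸ hgs
        simp [hc, hgc, List.count_append]
      · have hc' : ¬ (some s[m] = some c) := by simp [hc]
        simp [hgs, hc, hc', List.count_append]

lemma pvSupplyCount (s g : List Char) (c : Char)
    (hlen : s.length ≤ g.length) :
    pvBCountIf
      (fun j => !(PySem.List.pyGetD (pvBGreen s g s.length) j false)
        && (PySem.List.pyGetD s j ' ' == c)) ((s.length : Nat) : Int)
      = ((pvCnt0 s g c : Nat) : Int) := by
  rw [pvSupplyAux s g c s.length le_rfl hlen]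
  have h : (pvZ1 s g).take s.length = pvZ1 s g :=
    List.take_of_length_le (by simp [pvZ1])
  rw [h]
  rfl

-- pvRun digit characterization: digit k is decided by the rank-vs-count rule
lemma pvRunGet (l : List (Option Char)) (cnt : Char → Nat) (k : Nat) (hk : k < l.length) :
    (pvRun l cnt).1.getD k 0
      = match l[k] with
        | none => 2
        | some ch => if (l.take (k + 1)).count (some ch) ≤ cnt ch then 1 else 0 := by
  induction l generalizing cnt k with
  | nil => simp at hk
  | cons o l ih =>
    cases k with
    | zero =>
      cases o with
      | none => simp [pvRun]
      | some ch =>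
        by_cases h : 0 < cnt ch
        · have h1 : (1 : Nat) ≤ cnt ch := h
          simp [pvRun, h, h1]
        · have h1 : ¬ ((1 : Nat) ≤ cnt ch) := h
          simp [pvRun, h, h1]
    | succ k =>
      have hk' : k < l.length := by simpa using hk
      have hmem : l[k] ∈ l.take (k + 1) := by
        rw [List.take_succ_eq_append_getElem hk']
        exact List.mem_append_right _ (List.mem_singleton_self _)
      cases o with
      | none =>
        simp only [pvRun, List.getD_cons_succ, List.getElem_cons_succ, List.take_succ_cons]
        rw [ih cnt k hk']
        cases hl : l[k] with
        | none => rfl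
        | some ch =>
          dsimp only
          have h2 : (none :: l.take (k + 1)).count (some ch)
              = (l.take (k + 1)).count (some ch) := by simp
          simp only [h2]
      | some ch0 =>
        by_cases h : 0 < cnt ch0
        · simp only [pvRun, if_pos h, List.getD_cons_succ, List.getElem_cons_succ,
            List.take_succ_cons]
          rw [ih (pvDec cnt ch0) k hk']
          cases hl : l[k] with
          | none => rfl
          | some ch =>
            dsimp only
            by_cases hcc : ch = ch0
            · subst hcc
              have h1 : pvDec cnt ch ch = cnt ch - 1 := by simp [pvDec]
              have h2 : (some ch :: l.take (k + 1)).count (some ch)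
                  = (l.take (k + 1)).count (some ch) + 1 := by simp
              simp only [h1, h2]
              exact if_congr (by omega) rfl rfl
            · have h1 : pvDec cnt ch0 ch = cnt ch := by simp [pvDec, hcc]
              have h2 : (some ch0 :: l.take (k + 1)).count (some ch)
                  = (l.take (k + 1)).count (some ch) := by simp [List.count_cons]; exact fun hx => hcc hx.symm
              simp only [h1, h2]
        · simp only [pvRun, if_neg h, List.getD_cons_succ, List.getElem_cons_succ,
            List.take_succ_cons]
          rw [ih cnt k hk']
          cases hl : l[k] with
          | none => rfl
          | some ch =>
            dsimp only
            by_cases hcc : ch = ch0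
            · subst hcc
              have hge : 1 ≤ (l.take (k + 1)).count (some ch) :=
                List.count_pos_iff.mpr (hl ▸ hmem)
              have h2 : (some ch :: l.take (k + 1)).count (some ch)
                  = (l.take (k + 1)).count (some ch) + 1 := by simp
              simp only [h2]
              exact if_congr (by omega) rfl rfl
            · have h2 : (some ch0 :: l.take (k + 1)).count (some ch)
                  = (l.take (k + 1)).count (some ch) := by simp [List.count_cons]; exact fun hx => hcc hx.symm
              simp only [h2]

-- B's digit equals the digit of the reference run
lemma pvDigitEq (s g : List Char) (hlen : s.length ≤ g.length) (k : Nat) (hk : k < s.length) :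
    pvBDigit s g (pvBGreen s g s.length) s.length (k : Int)
      = (pvRun (pvZ2 s g) (pvCnt0 s g)).1.getD k 0 := by
  have hkg : k < g.length := by omega
  have hlZ2 : (pvZ2 s g).length = s.length := by simp [pvZ2]; omega
  have hkZ2 : k < (pvZ2 s g).length := by omega
  have hZ2k : (pvZ2 s g)[k] = if g[k] = s[k] then none else some g[k] := by
    simp [pvZ2, List.getElem_zipWith]
  have hrun := pvRunGet (pvZ2 s g) (pvCnt0 s g) k hkZ2
  have hsg : s.getD k ' ' = s[k] := List.getD_eq_getElem s ' ' hk
  have hgg : g.getD k ' ' = g[k] := List.getD_eq_getElem g ' ' hkg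
  have hgetg : PySem.List.pyGetD g ((k : Nat) : Int) ' ' = g[k] := by
    rw [PySem.List.pyGetD_natCast, hgg]
  unfold pvBDigit
  simp only [pvGreenGet s g s.length k hk, hsg, hgg]
  by_cases hgs : g[k] = s[k]
  · have hb : (s[k] == g[k]) = true := by simp [hgs]
    rw [hb, if_pos rfl, hrun, hZ2k, if_pos hgs]
  · have hb : (s[k] == g[k]) = false := by
      simp only [beq_eq_false_iff_ne, ne_eq]
      exact fun h => hgs h.symm
    simp only [hb, Bool.false_eq_true, if_false, hgetg]
    have hcast : ((k : Nat) : Int) + 1 = (((k + 1 : Nat)) : Int) := by omega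
    simp only [hcast, pvRankCount s g g[k] (k + 1) (by omega) hlen,
        pvSupplyCount s g g[k] hlen]
    rw [hrun, hZ2k, if_neg hgs]
    exact if_congr Nat.cast_le rfl rfl

-- B's weighted sum accumulates exactly the Horner encoding of the reference digits
lemma pvBFold (s g : List Char) (hlen : s.length ≤ g.length) :
    (List.range s.length).foldl
      (fun acc (k : Nat) => acc + pvBDigit s g (pvBGreen s g s.length) s.length (k : Int)
        * 3 ^ (s.length - 1 - ((k : Int)).toNat)) 0
      = (pvRun (pvZ2 s g) (pvCnt0 s g)).1.foldl (fun x d => x * 3 + d) 0 := by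
  have hlZ2 : (pvZ2 s g).length = s.length := by simp [pvZ2]; omega
  have hD : (pvRun (pvZ2 s g) (pvCnt0 s g)).1.length = s.length := by
    rw [pvRunLength]; exact hlZ2
  have h := pvFoldInv
    (fun acc (k : Nat) => acc + pvBDigit s g (pvBGreen s g s.length) s.length (k : Int)
      * 3 ^ (s.length - 1 - ((k : Int)).toNat))
    (fun k acc => acc = (((pvRun (pvZ2 s g) (pvCnt0 s g)).1.take k).foldl
      (fun x d => x * 3 + d) 0) * 3 ^ (s.length - k))
    s.length ?_ 0 ?_
  · rw [h, List.take_of_length_le (by omega)]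
    simp
  · intro k acc hk hacc
    have hkD : k < (pvRun (pvZ2 s g) (pvCnt0 s g)).1.length := by omega
    have htk : (pvRun (pvZ2 s g) (pvCnt0 s g)).1.take (k + 1)
        = (pvRun (pvZ2 s g) (pvCnt0 s g)).1.take k
          ++ [(pvRun (pvZ2 s g) (pvCnt0 s g)).1[k]] :=
      List.take_succ_eq_append_getElem hkD
    have hgetD : (pvRun (pvZ2 s g) (pvCnt0 s g)).1.getD k 0
        = (pvRun (pvZ2 s g) (pvCnt0 s g)).1[k] := List.getD_eq_getElem _ 0 hkD
    dsimp only
    rw [hacc, pvDigitEq s g hlen k hk, htk, pvEncAppend, hgetD, Int.toNat_natCast]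
    have hsplit : s.length - k = (s.length - 1 - k) + 1 := by omega
    rw [hsplit, pow_succ]
    have he : s.length - 1 - k = s.length - (1 + k) := by omega
    rw [he]
    ring_nf
  · simp

-- ===== VERDICT (by name: the statement is the Claim_ definition above) =====
theorem pattern_id_for_spec : Claim_equal_pattern_id_for := by
  intro secret guess _ hpre
  unfold Spec_pattern_id_for pattern_id_for pattern_id_for_alt
  have hlen : secret.toList.length ≤ guess.toList.length := hpre
  simp only [pvRangeFold]
  rw [pvGreenLoop secret.toList guess.toList hlen]
  rw [pvYellowLoop secret.toList guess.toList hlen]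
  rw [pvBFold secret.toList guess.toList hlen]
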